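-- pv_equiv track=rewrite | github.com/DarKoul-Wmg/AMS-AWS-1 | MP03 Programación/UF2_Python dineño modular/Ejercicios/PT25_recursividad2/ex9_metodo_burbuja.py | do_pasada
-- ===== SOURCE A (Python) =====
-- def do_pasada(lista):
--     resultado = []
--     # si solo tenemos un número en la lista, añadimos el numero al resultado y lo devolvemos
--     if len(lista)==1:
--         resultado.append(lista[0])
--         return resultado
--     # si tenemos mas elementos, comparamos el primer elemento de la lista con el segundo, añadimos el primer
--     # elemento al resultado, ya que éste no se modificará, y realizamos el mismo proceso con el resto de
--     # la lista ( es decir , la lista sin el primer elemento).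
--     if lista[0] > lista[1]:
--         lista[0], lista[1] = lista[1], lista[0]
--     resultado.append(lista[0])
--     # a resultado le vamos añadiendo los resultados de las llamadas con las listas parciales, es decir, las
--     # llamadas con la lista menos primer elemento
--     resultado = resultado + do_pasada(lista[1:])
--     return resultado
-- ===== SOURCE B (Python) =====
-- def do_pasada(lista):
--     # One bubble pass as a single iterative carry scan instead of recursion over slices.
--     # Like A, it mutates at most the first two elements of the argument (the one front swap).
--     if len(lista) == 1:
--         return [lista[0]]
--     if lista[0] > lista[1]:
--         lista[0], lista[1] = lista[1], lista[0]
--     carry = lista[0]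
--     resultado = []
--     for x in lista[1:]:
--         if carry > x:
--             resultado.append(x)
--         else:
--             resultado.append(carry)
--             carry = x
--     resultado.append(carry)
--     return resultado
-- ===== Notes on version B (the rewrite author's own statement) =====
-- stated objective: faster
-- what changed: Replaces A's recursion over list slices (each level slicing lista[1:] and concatenating result lists) with one iterative left-to-right carry scan that bubbles the maximum rightward in a single loop with no slicing, no concatenation and no recursion.
import Mathlib
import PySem

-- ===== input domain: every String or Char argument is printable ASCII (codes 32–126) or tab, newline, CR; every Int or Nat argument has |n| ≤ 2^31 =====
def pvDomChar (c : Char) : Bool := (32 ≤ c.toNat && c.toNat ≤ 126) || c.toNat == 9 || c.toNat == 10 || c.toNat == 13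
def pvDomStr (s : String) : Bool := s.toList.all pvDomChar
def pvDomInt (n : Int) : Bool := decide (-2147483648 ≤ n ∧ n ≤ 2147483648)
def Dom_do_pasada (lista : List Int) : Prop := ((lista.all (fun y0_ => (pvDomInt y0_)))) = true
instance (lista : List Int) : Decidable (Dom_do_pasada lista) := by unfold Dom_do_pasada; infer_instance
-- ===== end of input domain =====

-- B replaces A's recursion over slices by one iterative carry scan; equivalence is about the
-- RETURN value: both Pythons mutate at most the argument's first two elements (the one front swap).
-- ===== PORT A =====
def do_pasada (lista : List Int) : List Int :=
  match lista with
  | [] => []   -- Python raises IndexError here; excluded by Pre_do_pasada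
  | [x] => [x]
  | a :: b :: rest =>
      -- if lista[0] > lista[1]: swap lista[0], lista[1]; append lista[0]; recurse on lista[1:]
      if a > b then b :: do_pasada (a :: rest) else a :: do_pasada (b :: rest)

-- ===== PORT B =====
-- the carry loop of Source B: appends min(carry,x) and carries max along; final carry appended
def pvPass (carry : Int) : List Int → List Int
  | [] => [carry]
  | x :: t => if carry > x then x :: pvPass carry t else carry :: pvPass x t

def do_pasada_alt (lista : List Int) : List Int :=
  match lista with
  | [] => []   -- Python raises IndexError here; excluded by Pre_do_pasada
  | [x] => [x]
  | a :: b :: rest =>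
      let p : Int × Int := if a > b then (b, a) else (a, b)
      pvPass p.1 (p.2 :: rest)

-- ===== PRECONDITION & SPEC =====
-- Pre_ excludes only the empty list, on which Python A raises IndexError (lista[1] on the swap test).
def Pre_do_pasada (lista : List Int) : Prop := lista ≠ []
instance (lista : List Int) : Decidable (Pre_do_pasada lista) := by unfold Pre_do_pasada; infer_instance
def pvWitness_do_pasada : List Int := [3, 1, 2]
def Spec_do_pasada (lista : List Int) (out : List Int) : Prop := out = do_pasada_alt lista
instance (lista : List Int) (out : List Int) : Decidable (Spec_do_pasada lista out) := by unfold Spec_do_pasada; infer_instance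

-- ===== CLAIM (what is proved, stated in full; the proofs are below) =====
def Claim_equal_do_pasada : Prop := ∀ (lista : List Int), Dom_do_pasada lista → Pre_do_pasada lista → Spec_do_pasada lista (do_pasada lista)

-- ===== LEMMAS AND PROOFS =====
-- A's recursion over slices computes exactly one carry pass
theorem do_pasada_cons (x : Int) (xs : List Int) : do_pasada (x :: xs) = pvPass x xs := by
  induction xs generalizing x with
  | nil => simp [do_pasada, pvPass]
  | cons y t ih =>
      simp only [do_pasada, pvPass]
      split_ifs <;> simp [ih]

-- ===== VERDICT (by name: the statement is the Claim_ definition above) =====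
theorem do_pasada_spec : Claim_equal_do_pasada := by
  intro lista _ hpre
  unfold Spec_do_pasada
  match lista with
  | [] => exact absurd rfl hpre
  | [x] => simp [do_pasada, do_pasada_alt]
  | a :: b :: rest =>
      rw [do_pasada_cons]
      simp only [do_pasada_alt, pvPass]
      split_ifs <;> first | rfl | omega
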